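-- pv_equiv track=rewrite | github.com/raquel-romao/takuzu_project | takuzu_naive.py | Window_Sum
-- ===== SOURCE A (Python) =====
-- def Window_Sum(arr):
--
--     n = len(arr)
--
--     window_sum = sum(arr[:3])
--     a=True
--     if window_sum not in [1,2]:
--         a=False
--     if a:
--         for i in range(n - 3):
--             window_sum = window_sum - arr[i] + arr[i + 3]
--             if window_sum not in [1,2]:
--                 a=False
--                 break
--
--     return a
-- ===== SOURCE B (Python) =====
-- def Window_Sum(arr):
--     n = len(arr)
--     if n < 3:
--         return sum(arr) in (1, 2)
--     return all(sum(arr[i:i + 3]) in (1, 2) for i in range(n - 2))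
-- ===== Notes on version B (the rewrite author's own statement) =====
-- stated objective: idiomatic
-- what changed: Replaces the stateful sliding-window accumulator with early break/flag bookkeeping by a direct all() over per-window sums recomputed from scratch, with the n<3 case handled by one up-front check.
import Mathlib
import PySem

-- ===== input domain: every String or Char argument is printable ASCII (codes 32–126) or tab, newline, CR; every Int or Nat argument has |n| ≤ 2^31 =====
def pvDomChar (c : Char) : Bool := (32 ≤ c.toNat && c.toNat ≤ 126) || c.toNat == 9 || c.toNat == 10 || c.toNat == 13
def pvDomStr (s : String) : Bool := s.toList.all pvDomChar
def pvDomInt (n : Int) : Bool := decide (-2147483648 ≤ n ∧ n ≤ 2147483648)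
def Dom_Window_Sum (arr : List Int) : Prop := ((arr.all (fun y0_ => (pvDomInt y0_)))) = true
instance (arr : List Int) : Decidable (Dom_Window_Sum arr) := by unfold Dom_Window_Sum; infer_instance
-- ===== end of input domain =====

-- B replaces A's incrementally updated sliding sum with flag/break bookkeeping by a
-- direct per-window check (idiomatic all over recomputed window sums); same O(n) cost.

-- ===== PORT A =====
def Window_Sum (arr : List Int) : Bool :=
  let n : Int := arr.length
  let window_sum := (PySem.List.slice arr none (some 3)).sum
  let a := true
  let a := if window_sum = 1 ∨ window_sum = 2 then a else false
  let st :=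
    if a then
      (PySem.List.pyRange 0 (n - 3) 1).foldl
        (fun (st : Int × Bool) i =>
          if st.2 then
            let ws := st.1 - PySem.List.pyGetD arr i 0 + PySem.List.pyGetD arr (i + 3) 0
            (ws, if ws = 1 ∨ ws = 2 then true else false)
          else st)  -- Python's break: once a=False the loop does nothing more
        (window_sum, a)
    else (window_sum, a)
  st.2

-- ===== PORT B =====
def Window_Sum_alt (arr : List Int) : Bool :=
  let n : Int := arr.length
  if n < 3 then (arr.sum == 1 || arr.sum == 2)
  else
    (PySem.List.pyRange 0 (n - 2) 1).all (fun i =>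
      let s := (PySem.List.slice arr (some i) (some (i + 3))).sum
      s == 1 || s == 2)

-- ===== PRECONDITION & SPEC =====
def Spec_Window_Sum (arr : List Int) (out : Bool) : Prop := out = Window_Sum_alt arr
instance (arr : List Int) (out : Bool) : Decidable (Spec_Window_Sum arr out) := by unfold Spec_Window_Sum; infer_instance

-- ===== CLAIM (what is proved, stated in full; the proofs are below) =====
def Claim_equal_Window_Sum : Prop := ∀ (arr : List Int), Dom_Window_Sum arr → Spec_Window_Sum arr (Window_Sum arr)

-- ===== LEMMAS AND PROOFS =====

-- the length-3 window sum starting at index i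
def pvWin (arr : List Int) (i : Nat) : Int := ((arr.drop i).take 3).sum

lemma pvWin_eq_getD (arr : List Int) (i : Nat) (h : i + 3 ≤ arr.length) :
    pvWin arr i = arr.getD i 0 + arr.getD (i + 1) 0 + arr.getD (i + 2) 0 := by
  induction arr generalizing i with
  | nil => simp at h
  | cons x xs ih =>
    cases i with
    | zero =>
      simp only [List.length_cons] at h
      match xs, h with
      | y :: z :: rest, _ => simp [pvWin]; ring
    | succ j =>
      simp only [List.length_cons] at h
      have := ih j (by omega)
      simpa [pvWin, List.drop_succ_cons] using this

-- A's loop body, named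
def pvStep (arr : List Int) : Int × Bool → Int → Int × Bool :=
  fun st i =>
    if st.2 then
      let ws := st.1 - PySem.List.pyGetD arr i 0 + PySem.List.pyGetD arr (i + 3) 0
      (ws, if ws = 1 ∨ ws = 2 then true else false)
    else st

def pvInit (arr : List Int) : Int × Bool :=
  (pvWin arr 0, if pvWin arr 0 = 1 ∨ pvWin arr 0 = 2 then true else false)

lemma foldl_pvStep_false (arr : List Int) (l : List Int) (ws : Int) :
    l.foldl (pvStep arr) (ws, false) = (ws, false) := by
  induction l with
  | nil => rfl
  | cons x xs ih => simpa [pvStep] using ih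

-- invariant of A's fold: second component is "all windows 0..m are good",
-- and while it is true the first component is the current window sum
lemma pvLoop (arr : List Int) (m : Nat) (hm : m + 3 ≤ arr.length) :
    ((PySem.List.pyRange 0 (m : Int) 1).foldl (pvStep arr) (pvInit arr)).2
      = decide (∀ j, j ≤ m → (pvWin arr j = 1 ∨ pvWin arr j = 2))
    ∧ (((PySem.List.pyRange 0 (m : Int) 1).foldl (pvStep arr) (pvInit arr)).2 = true
      → ((PySem.List.pyRange 0 (m : Int) 1).foldl (pvStep arr) (pvInit arr)).1 = pvWin arr m) := by
  induction m with
  | zero =>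
    have h0 : PySem.List.pyRange 0 ((0 : Nat) : Int) 1 = [] := by
      rw [Nat.cast_zero]; exact PySem.List.pyRange_one_eq_nil le_rfl
    rw [h0]
    simp only [List.foldl_nil, pvInit]
    constructor
    · by_cases h : pvWin arr 0 = 1 ∨ pvWin arr 0 = 2
      · simp only [h, if_true]; symm; rw [decide_eq_true_iff]
        intro j hj; interval_cases j; exact h
      · simp only [h, if_false]; symm; rw [decide_eq_false_iff_not]
        intro hall; exact h (hall 0 le_rfl)
    · intro _; trivial
  | succ k ih =>
    have hk := ih (by omega)
    have hrange : PySem.List.pyRange 0 ((k : Int) + 1) 1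
        = PySem.List.pyRange 0 (k : Int) 1 ++ [(k : Int)] :=
      PySem.List.pyRange_one_succ_right (by positivity)
    push_cast
    rw [hrange, List.foldl_append]
    set st := (PySem.List.pyRange 0 (k : Int) 1).foldl (pvStep arr) (pvInit arr) with hst
    by_cases hb : st.2 = true
    · have hws : st.1 = pvWin arr k := hk.2 hb
      have hall : ∀ j, j ≤ k → (pvWin arr j = 1 ∨ pvWin arr j = 2) := by
        have h1 := hk.1; rw [hb] at h1; exact of_decide_eq_true h1.symm
      have hnew : st.1 - PySem.List.pyGetD arr (k : Int) 0
            + PySem.List.pyGetD arr ((k : Int) + 3) 0 = pvWin arr (k + 1) := by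
        have h1 := pvWin_eq_getD arr k (by omega)
        have h2 := pvWin_eq_getD arr (k + 1) (by omega)
        have e3 : ((k : Int) + 3) = ((k + 3 : Nat) : Int) := by push_cast; ring
        rw [hws, e3, PySem.List.pyGetD_natCast, PySem.List.pyGetD_natCast, h1, h2,
          show k + 1 + 1 = k + 2 from rfl, show k + 1 + 2 = k + 3 from rfl]
        ring
      simp only [List.foldl_cons, List.foldl_nil, pvStep, hb, if_true, hnew]
      constructor
      · by_cases hg : pvWin arr (k+1) = 1 ∨ pvWin arr (k+1) = 2
        · simp only [hg, if_true]
          symm; rw [decide_eq_true_iff]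
          intro j hj
          rcases Nat.lt_or_ge j (k+1) with h | h
          · exact hall j (by omega)
          · have : j = k + 1 := by omega
            rw [this]; exact hg
        · simp only [hg, if_false]
          symm; rw [decide_eq_false_iff_not]
          intro hcon; exact hg (hcon (k+1) (le_refl _))
      · intro h2
        by_cases hg : pvWin arr (k+1) = 1 ∨ pvWin arr (k+1) = 2 <;> simp [hg] at h2 ⊢
    · have hb' : st.2 = false := by simpa using hb
      have hbad : ¬ (∀ j, j ≤ k → (pvWin arr j = 1 ∨ pvWin arr j = 2)) := by
        have h1 := hk.1; rw [hb'] at h1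
        exact of_decide_eq_false h1.symm
      simp only [List.foldl_cons, List.foldl_nil, pvStep, hb', Bool.false_eq_true, if_false]
      constructor
      · symm; rw [decide_eq_false_iff_not]
        intro hcon; exact hbad (fun j hj => hcon j (by omega))
      · intro h; exact absurd h (by simp)

lemma Window_Sum_eq_fold (arr : List Int) :
    Window_Sum arr
      = ((PySem.List.pyRange 0 ((arr.length : Int) - 3) 1).foldl (pvStep arr) (pvInit arr)).2 := by
  have hslice : PySem.List.slice arr none (some 3) = arr.take 3 := by
    simpa using PySem.List.slice_to (xs := arr) (b := 3) (by norm_num)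
  have hwin : pvWin arr 0 = (arr.take 3).sum := by simp [pvWin]
  unfold Window_Sum
  rw [hslice]
  by_cases h : (arr.take 3).sum = 1 ∨ (arr.take 3).sum = 2
  · simp only [h, if_true]
    have : pvInit arr = ((arr.take 3).sum, true) := by
      simp only [pvInit, hwin, h, if_true]
    rw [this]
    rfl
  · simp only [h, if_false]
    have : pvInit arr = ((arr.take 3).sum, false) := by
      simp only [pvInit, hwin, h, if_false]
    rw [this, foldl_pvStep_false]
    simp

-- ===== VERDICT (by name: the statement is the Claim_ definition above) =====
theorem Window_Sum_spec : Claim_equal_Window_Sum := by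
  intro arr _
  unfold Spec_Window_Sum Window_Sum_alt
  rw [Window_Sum_eq_fold]
  by_cases hn : arr.length < 3
  · have h0 : PySem.List.pyRange 0 ((arr.length : Int) - 3) 1 = [] :=
      PySem.List.pyRange_one_eq_nil (by omega)
    rw [h0]
    simp only [List.foldl_nil, pvInit]
    have htake : arr.take 3 = arr := List.take_of_length_le (by omega)
    have hw : pvWin arr 0 = arr.sum := by simp [pvWin, htake]
    simp only [if_pos (by exact_mod_cast hn : (arr.length : Int) < 3), hw]
    by_cases h : arr.sum = 1 ∨ arr.sum = 2
    · rcases h with h | h <;> simp [h]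
    · push_neg at h
      simp [h.1, h.2]
  · have hn' : 3 ≤ arr.length := by omega
    have hm3 : ((arr.length : Int) - 3) = ((arr.length - 3 : Nat) : Int) := by push_cast; omega
    rw [hm3]
    have hL := (pvLoop arr (arr.length - 3) (by omega)).1
    rw [hL]
    rw [if_neg (by omega : ¬ ((arr.length : Int) < 3))]
    by_cases hall : ∀ j, j ≤ arr.length - 3 → (pvWin arr j = 1 ∨ pvWin arr j = 2)
    · rw [decide_eq_true hall]
      symm
      rw [List.all_eq_true]
      intro i hi
      rw [PySem.List.mem_pyRange_one] at hi
      obtain ⟨j, rfl⟩ : ∃ j : Nat, i = (j : Int) := ⟨i.toNat, (Int.toNat_of_nonneg hi.1).symm⟩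
      have hj : j ≤ arr.length - 3 := by
        have := hi.2; omega
      have hs : PySem.List.slice arr (some (j : Int)) (some ((j : Int) + 3)) = (arr.drop j).take 3 := by
        have := PySem.List.slice_natCast_add (xs := arr) (j := j) (n := 3)
        simpa using this
      simp only [hs]
      rcases hall j hj with h | h <;> simp [pvWin] at h <;> simp [h]
    · rw [decide_eq_false hall]
      symm
      rw [Bool.eq_false_iff]
      intro hcon
      rw [List.all_eq_true] at hcon
      apply hall
      intro j hj
      have hmem : ((j : Int)) ∈ PySem.List.pyRange 0 ((arr.length : Int) - 2) 1 := by
        rw [PySem.List.mem_pyRange_one]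
        constructor
        · positivity
        · omega
      have := hcon _ hmem
      have hs : PySem.List.slice arr (some (j : Int)) (some ((j : Int) + 3)) = (arr.drop j).take 3 := by
        have := PySem.List.slice_natCast_add (xs := arr) (j := j) (n := 3)
        simpa using this
      simp only [hs] at this
      have : ((arr.drop j).take 3).sum = 1 ∨ ((arr.drop j).take 3).sum = 2 := by
        rcases Bool.or_eq_true_iff.mp this with h | h
        · left; exact of_decide_eq_true h
        · right; exact of_decide_eq_true h
      simpa [pvWin] using this
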